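-- pv_equiv track=rewrite | github.com/makeorbreakshop/video-scripter | scripts/ml_pattern_extraction.py | generate_pattern_categories
-- ===== SOURCE A (Python) =====
-- def generate_pattern_categories(rules):
--     """Categorize patterns by type"""
--
--     categories = {
--         'title_patterns': [],
--         'timing_patterns': [],
--         'format_topic_combos': [],
--         'velocity_patterns': [],
--         'channel_tier_patterns': []
--     }
--
--     for rule in rules:
--         conditions = rule['conditions']
--
--         # Categorize based on conditions
--         if any('title_length' in cond for cond in conditions):
--             categories['title_patterns'].append(rule)
--         elif any('day_of_week' in cond or 'hour_of_day' in cond for cond in conditions):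
--             categories['timing_patterns'].append(rule)
--         elif any('format' in cond for cond in conditions) and any('topic_cluster' in cond for cond in conditions):
--             categories['format_topic_combos'].append(rule)
--         elif any('velocity' in cond for cond in conditions):
--             categories['velocity_patterns'].append(rule)
--         else:
--             categories['format_topic_combos'].append(rule)  # Default category
--
--     return categories
-- ===== SOURCE B (Python) =====
-- def generate_pattern_categories(rules):
--     """Categorize patterns by type"""
--
--     def classify(rule):
--         conditions = rule['conditions']
--         if any('title_length' in cond for cond in conditions):
--             return 'title_patterns'
--         if any('day_of_week' in cond or 'hour_of_day' in cond for cond in conditions):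
--             return 'timing_patterns'
--         if any('format' in cond for cond in conditions) and any('topic_cluster' in cond for cond in conditions):
--             return 'format_topic_combos'
--         if any('velocity' in cond for cond in conditions):
--             return 'velocity_patterns'
--         return 'format_topic_combos'  # default category
--
--     names = ['title_patterns', 'timing_patterns', 'format_topic_combos',
--              'velocity_patterns', 'channel_tier_patterns']
--     return {name: [rule for rule in rules if classify(rule) == name] for name in names}
-- ===== Notes on version B (the rewrite author's own statement) =====
-- stated objective: alternative
-- what changed: Replaces the single pass that mutates five lists inside a dict with a pure classify(rule) function plus a per-category dict comprehension that filters the rules list once per category (grouping by key instead of dispatch-and-append).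
import Mathlib
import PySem

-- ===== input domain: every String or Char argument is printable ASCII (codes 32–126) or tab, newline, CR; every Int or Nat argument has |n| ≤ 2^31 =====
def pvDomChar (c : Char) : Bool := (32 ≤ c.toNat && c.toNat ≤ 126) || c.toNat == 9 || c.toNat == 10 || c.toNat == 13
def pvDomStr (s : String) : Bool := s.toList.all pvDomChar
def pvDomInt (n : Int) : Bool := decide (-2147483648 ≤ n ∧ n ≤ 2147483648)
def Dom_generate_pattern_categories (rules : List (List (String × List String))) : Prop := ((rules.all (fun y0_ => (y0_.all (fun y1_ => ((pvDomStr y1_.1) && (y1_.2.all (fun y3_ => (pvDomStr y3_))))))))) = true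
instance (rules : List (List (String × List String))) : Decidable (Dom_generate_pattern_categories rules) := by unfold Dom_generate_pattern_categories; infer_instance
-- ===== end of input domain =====

-- B replaces A's single dispatch-and-append pass over a mutable dict by a pure classify
-- function plus one filter of the rules list per category (objective: alternative).

-- rule['conditions'] (dict lookup; [] only reached outside Pre_, where Python raises KeyError)
def gpcConds (rule : List (String × List String)) : List String :=
  (PySem.Dict.mk rule).getD "conditions" []

-- ===== PORT A =====
-- one step of A's loop body: the if/elif cascade appending the rule to its category list
def gpcStep (cats : PySem.Dict String (List (List (String × List String))))
    (rule : List (String × List String)) :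
    PySem.Dict String (List (List (String × List String))) :=
  if (gpcConds rule).any (fun cond => PySem.Str.isIn "title_length" cond) then
    cats.modify "title_patterns" [] (· ++ [rule])
  else if (gpcConds rule).any (fun cond => PySem.Str.isIn "day_of_week" cond || PySem.Str.isIn "hour_of_day" cond) then
    cats.modify "timing_patterns" [] (· ++ [rule])
  else if (gpcConds rule).any (fun cond => PySem.Str.isIn "format" cond) && (gpcConds rule).any (fun cond => PySem.Str.isIn "topic_cluster" cond) then
    cats.modify "format_topic_combos" [] (· ++ [rule])
  else if (gpcConds rule).any (fun cond => PySem.Str.isIn "velocity" cond) then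
    cats.modify "velocity_patterns" [] (· ++ [rule])
  else
    cats.modify "format_topic_combos" [] (· ++ [rule])

def generate_pattern_categories (rules : List (List (String × List String))) : List (String × List (List (String × List String))) :=
  let categories : PySem.Dict String (List (List (String × List String))) :=
    PySem.Dict.ofList [("title_patterns", []), ("timing_patterns", []),
      ("format_topic_combos", []), ("velocity_patterns", []), ("channel_tier_patterns", [])]
  (rules.foldl gpcStep categories).items

-- ===== PORT B =====
def gpcClassify (rule : List (String × List String)) : String :=
  if (gpcConds rule).any (fun cond => PySem.Str.isIn "title_length" cond) then "title_patterns"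
  else if (gpcConds rule).any (fun cond => PySem.Str.isIn "day_of_week" cond || PySem.Str.isIn "hour_of_day" cond) then "timing_patterns"
  else if (gpcConds rule).any (fun cond => PySem.Str.isIn "format" cond) && (gpcConds rule).any (fun cond => PySem.Str.isIn "topic_cluster" cond) then "format_topic_combos"
  else if (gpcConds rule).any (fun cond => PySem.Str.isIn "velocity" cond) then "velocity_patterns"
  else "format_topic_combos"

def generate_pattern_categories_alt (rules : List (List (String × List String))) : List (String × List (List (String × List String))) :=
  ["title_patterns", "timing_patterns", "format_topic_combos",
   "velocity_patterns", "channel_tier_patterns"].map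
    (fun name => (name, rules.filter (fun rule => gpcClassify rule == name)))

-- ===== PRECONDITION & SPEC =====
-- Pre_ excludes rules lacking a 'conditions' key, on which Python's rule['conditions'] raises KeyError.
def Pre_generate_pattern_categories (rules : List (List (String × List String))) : Prop :=
  (rules.all (fun rule => rule.any (fun p => p.1 == "conditions"))) = true
instance (rules : List (List (String × List String))) : Decidable (Pre_generate_pattern_categories rules) := by unfold Pre_generate_pattern_categories; infer_instance
def pvWitness_generate_pattern_categories : (List (List (String × List String))) :=
  [[("conditions", ["velocity_over_2"])], [("conditions", ["title_length<30"])]]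

def Spec_generate_pattern_categories (rules : List (List (String × List String))) (out : List (String × List (List (String × List String)))) : Prop := out = generate_pattern_categories_alt rules
instance (rules : List (List (String × List String))) (out : List (String × List (List (String × List String)))) : Decidable (Spec_generate_pattern_categories rules out) := by unfold Spec_generate_pattern_categories; infer_instance

-- ===== CLAIM (what is proved, stated in full; the proofs are below) =====
def Claim_equal_generate_pattern_categories : Prop := ∀ (rules : List (List (String × List String))), Dom_generate_pattern_categories rules → Pre_generate_pattern_categories rules → Spec_generate_pattern_categories rules (generate_pattern_categories rules)

-- ===== LEMMAS AND PROOFS =====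

-- invariant of A's loop: the five lists in the dict are the already-filtered prefix
theorem gpc_invariant (rules : List (List (String × List String)))
    (t ti f v c : List (List (String × List String))) :
    (rules.foldl gpcStep (PySem.Dict.mk
        [("title_patterns", t), ("timing_patterns", ti), ("format_topic_combos", f),
         ("velocity_patterns", v), ("channel_tier_patterns", c)])).items
    = [("title_patterns", t ++ rules.filter (fun r => gpcClassify r == "title_patterns")),
       ("timing_patterns", ti ++ rules.filter (fun r => gpcClassify r == "timing_patterns")),
       ("format_topic_combos", f ++ rules.filter (fun r => gpcClassify r == "format_topic_combos")),
       ("velocity_patterns", v ++ rules.filter (fun r => gpcClassify r == "velocity_patterns")),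
       ("channel_tier_patterns", c ++ rules.filter (fun r => gpcClassify r == "channel_tier_patterns"))] := by
  induction rules generalizing t ti f v c with
  | nil => simp
  | cons r rs ih =>
    by_cases h1 : ((gpcConds r).any (fun cond => PySem.Str.isIn "title_length" cond)) = true
    · have hc : gpcClassify r = "title_patterns" := by unfold gpcClassify; rw [if_pos h1]
      have hs : gpcStep (PySem.Dict.mk
          [("title_patterns", t), ("timing_patterns", ti), ("format_topic_combos", f),
           ("velocity_patterns", v), ("channel_tier_patterns", c)]) r
          = PySem.Dict.mk
          [("title_patterns", t ++ [r]), ("timing_patterns", ti), ("format_topic_combos", f),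
           ("velocity_patterns", v), ("channel_tier_patterns", c)] := by
        unfold gpcStep; rw [if_pos h1]; rfl
      rw [List.foldl_cons, hs, ih]
      simp [hc]
    · by_cases h2 : ((gpcConds r).any (fun cond => PySem.Str.isIn "day_of_week" cond || PySem.Str.isIn "hour_of_day" cond)) = true
      · have hc : gpcClassify r = "timing_patterns" := by unfold gpcClassify; rw [if_neg h1, if_pos h2]
        have hs : gpcStep (PySem.Dict.mk
            [("title_patterns", t), ("timing_patterns", ti), ("format_topic_combos", f),
             ("velocity_patterns", v), ("channel_tier_patterns", c)]) r
            = PySem.Dict.mk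
            [("title_patterns", t), ("timing_patterns", ti ++ [r]), ("format_topic_combos", f),
             ("velocity_patterns", v), ("channel_tier_patterns", c)] := by
          unfold gpcStep; rw [if_neg h1, if_pos h2]; rfl
        rw [List.foldl_cons, hs, ih]
        simp [hc]
      · by_cases h3 : ((gpcConds r).any (fun cond => PySem.Str.isIn "format" cond) && (gpcConds r).any (fun cond => PySem.Str.isIn "topic_cluster" cond)) = true
        · have hc : gpcClassify r = "format_topic_combos" := by unfold gpcClassify; rw [if_neg h1, if_neg h2, if_pos h3]
          have hs : gpcStep (PySem.Dict.mk
              [("title_patterns", t), ("timing_patterns", ti), ("format_topic_combos", f),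
               ("velocity_patterns", v), ("channel_tier_patterns", c)]) r
              = PySem.Dict.mk
              [("title_patterns", t), ("timing_patterns", ti), ("format_topic_combos", f ++ [r]),
               ("velocity_patterns", v), ("channel_tier_patterns", c)] := by
            unfold gpcStep; rw [if_neg h1, if_neg h2, if_pos h3]; rfl
          rw [List.foldl_cons, hs, ih]
          simp [hc]
        · by_cases h4 : ((gpcConds r).any (fun cond => PySem.Str.isIn "velocity" cond)) = true
          · have hc : gpcClassify r = "velocity_patterns" := by unfold gpcClassify; rw [if_neg h1, if_neg h2, if_neg h3, if_pos h4]
            have hs : gpcStep (PySem.Dict.mk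
                [("title_patterns", t), ("timing_patterns", ti), ("format_topic_combos", f),
                 ("velocity_patterns", v), ("channel_tier_patterns", c)]) r
                = PySem.Dict.mk
                [("title_patterns", t), ("timing_patterns", ti), ("format_topic_combos", f),
                 ("velocity_patterns", v ++ [r]), ("channel_tier_patterns", c)] := by
              unfold gpcStep; rw [if_neg h1, if_neg h2, if_neg h3, if_pos h4]; rfl
            rw [List.foldl_cons, hs, ih]
            simp [hc]
          · have hc : gpcClassify r = "format_topic_combos" := by unfold gpcClassify; rw [if_neg h1, if_neg h2, if_neg h3, if_neg h4]
            have hs : gpcStep (PySem.Dict.mk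
                [("title_patterns", t), ("timing_patterns", ti), ("format_topic_combos", f),
                 ("velocity_patterns", v), ("channel_tier_patterns", c)]) r
                = PySem.Dict.mk
                [("title_patterns", t), ("timing_patterns", ti), ("format_topic_combos", f ++ [r]),
                 ("velocity_patterns", v), ("channel_tier_patterns", c)] := by
              unfold gpcStep; rw [if_neg h1, if_neg h2, if_neg h3, if_neg h4]; rfl
            rw [List.foldl_cons, hs, ih]
            simp [hc]

-- ===== VERDICT (by name: the statement is the Claim_ definition above) =====
theorem generate_pattern_categories_spec : Claim_equal_generate_pattern_categories := by
  intro rules _ _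
  unfold Spec_generate_pattern_categories generate_pattern_categories generate_pattern_categories_alt
  have h := gpc_invariant rules [] [] [] [] []
  simp only [List.nil_append] at h
  simp [List.map]
  exact h
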